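-- pv_equiv track=rewrite | github.com/sjenks/advent-of-code | 2019/day24/run.py | biodiversity
-- ===== SOURCE A (Python) =====
-- def biodiversity(grid):
-- 	bioSum = 0
-- 	tileValue = 1
-- 	for y in range(len(grid)):
-- 		for x in range(len(grid[y])):
-- 			if grid[y][x] == '#':
-- 				bioSum += tileValue
-- 			tileValue *= 2
-- 	return bioSum
-- ===== SOURCE B (Python) =====
-- def biodiversity(grid):
--     bits = ''.join('1' if cell == '#' else '0' for row in grid for cell in row)
--     return int(bits[::-1], 2) if bits else 0
-- ===== Notes on version B (the rewrite author's own statement) =====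
-- stated objective: idiomatic
-- what changed: Replaces the arithmetic accumulation with a doubling tile weight by building a little-endian binary string over all cells and delegating the weighted sum to int(reversed_bits, 2).
import Mathlib
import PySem

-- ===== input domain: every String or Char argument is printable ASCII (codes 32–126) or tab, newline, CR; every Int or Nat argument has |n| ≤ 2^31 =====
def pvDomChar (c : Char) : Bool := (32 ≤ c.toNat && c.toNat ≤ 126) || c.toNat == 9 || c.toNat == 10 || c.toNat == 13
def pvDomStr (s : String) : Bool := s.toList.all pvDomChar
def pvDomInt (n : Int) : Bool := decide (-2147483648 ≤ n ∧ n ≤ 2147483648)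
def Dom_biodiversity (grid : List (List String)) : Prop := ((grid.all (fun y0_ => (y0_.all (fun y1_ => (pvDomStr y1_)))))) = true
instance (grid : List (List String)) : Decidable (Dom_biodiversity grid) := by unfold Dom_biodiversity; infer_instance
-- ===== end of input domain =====

-- B builds a little-endian binary string and parses it in one call, instead of A's running doubling weight; return values proved equal on all inputs.

-- ===== PORT A =====
-- A: nested loops accumulating (bioSum, tileValue); each cell adds tileValue when '#' and doubles tileValue.
def biodiversity (grid : List (List String)) : Int :=
  (grid.foldl
    (fun (st : Int × Int) row =>
      row.foldl
        (fun (st : Int × Int) cell =>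
          (if cell == "#" then st.1 + st.2 else st.1, st.2 * 2)) st)
    (0, 1)).1

-- ===== PORT B =====
-- bit characters of all cells in row-major order ('1' for '#', else '0')
def pvBits (grid : List (List String)) : List Char :=
  (grid.flatMap (fun row => row)).map (fun cell => if cell == "#" then '1' else '0')

-- int(s, 2): most-significant digit first
def pvParseBin (l : List Char) : Int :=
  l.foldl (fun acc c => acc * 2 + (if c == '1' then 1 else 0)) 0

def biodiversity_alt (grid : List (List String)) : Int :=
  let bits := pvBits grid
  if bits.isEmpty then 0 else pvParseBin bits.reverse

-- ===== PRECONDITION & SPEC =====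
def Spec_biodiversity (grid : List (List String)) (out : Int) : Prop := out = biodiversity_alt grid
instance (grid : List (List String)) (out : Int) : Decidable (Spec_biodiversity grid out) := by unfold Spec_biodiversity; infer_instance

-- ===== CLAIM (what is proved, stated in full; the proofs are below) =====
def Claim_equal_biodiversity : Prop := ∀ (grid : List (List String)), Dom_biodiversity grid → Spec_biodiversity grid (biodiversity grid)

-- ===== LEMMAS AND PROOFS =====

-- little-endian value of a cell list
def pvN : List String → Int
  | [] => 0
  | c :: cs => (if c == "#" then 1 else 0) + 2 * pvN cs

theorem pvA_foldl (cells : List String) (s t : Int) :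
    (cells.foldl
      (fun (st : Int × Int) cell =>
        (if cell == "#" then st.1 + st.2 else st.1, st.2 * 2)) (s, t)).1
      = s + t * pvN cells := by
  induction cells generalizing s t with
  | nil => simp [pvN]
  | cons c cs ih =>
    by_cases h : c == "#"
    · simp only [List.foldl, h, if_true]
      rw [ih, pvN]
      simp only [h, if_true]
      ring
    · simp only [List.foldl, h, if_false, Bool.false_eq_true]
      rw [ih, pvN]
      simp only [h, if_false, Bool.false_eq_true]
      ring

theorem pvB_parse (cells : List String) :
    pvParseBin ((cells.map (fun cell => if cell == "#" then '1' else '0')).reverse)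
      = pvN cells := by
  induction cells with
  | nil => simp [pvParseBin, pvN]
  | cons c cs ih =>
    have hstep : ∀ (l : List Char) (d : Char),
        pvParseBin (l ++ [d]) = pvParseBin l * 2 + (if d == '1' then 1 else 0) := by
      intro l d
      simp [pvParseBin, List.foldl_append]
    simp only [List.map, List.reverse_cons]
    rw [hstep, ih, pvN]
    by_cases h : c == "#" <;> simp [h] <;> ring

-- ===== VERDICT (by name: the statement is the Claim_ definition above) =====
theorem biodiversity_spec : Claim_equal_biodiversity := by
  intro grid _
  unfold Spec_biodiversity biodiversity biodiversity_alt pvBits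
  have hA : (grid.foldl
      (fun (st : Int × Int) row =>
        row.foldl
          (fun (st : Int × Int) cell =>
            (if cell == "#" then st.1 + st.2 else st.1, st.2 * 2)) st)
      (0, 1)).1 = 0 + 1 * pvN (grid.flatMap (fun row => row)) := by
    rw [← pvA_foldl (grid.flatMap (fun row => row)) 0 1]
    rw [List.foldl_flatMap]
  rw [hA]
  by_cases h : (grid.flatMap (fun row => row)) = []
  · simp [h, pvN]
  · have hne : (((grid.flatMap (fun row => row)).map
        (fun cell => if cell == "#" then '1' else '0')).isEmpty) = false := by
      have hgen : ∀ (l : List Char), l ≠ [] → l.isEmpty = false := by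
        intro l hl
        cases l with
        | nil => exact absurd rfl hl
        | cons a t => rfl
      exact hgen _ (fun hm => h (List.map_eq_nil_iff.mp hm))
    simp only [hne, Bool.false_eq_true, if_false]
    rw [pvB_parse]
    ring
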